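-- pv_equiv track=rewrite | github.com/ni851ste/psycho_stuff | src/tasks.py | odd_vowels_upper
-- ===== SOURCE A (Python) =====
-- def odd_vowels_upper(instr):
--     # Examples show that this question has inconsistencies
--     # Does the counter reset after every word?
--     # One example makes it seem like it does, the other negates this
--     # ToDo Question apparently unclear
--     # Note: it seems like if there are two spaces between words it works
--     # But the example inputs only have one space
--     vowels = ['a', 'e', 'i', 'o', 'u']
--     out_str = ""
--     i = 0
--
--     for current_char in instr:
--
--         # if vowel and odd position
--         if current_char in vowels and i % 2 == 1:
--             out_str += current_char.upper()
--         elif current_char == ' ':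
--             out_str += current_char
--             i = -1
--         else:
--             out_str += current_char
--         i += 1
--
--     return out_str
-- ===== SOURCE B (Python) =====
-- def odd_vowels_upper(instr):
--     words = instr.split(' ')
--     fixed = [''.join(c.upper() if i % 2 == 1 and c in 'aeiou' else c
--                      for i, c in enumerate(w))
--              for w in words]
--     return ' '.join(fixed)
-- ===== Notes on version B (the rewrite author's own statement) =====
-- stated objective: simpler
-- what changed: Replaces the flat character loop with a reset counter by a split-on-space / per-word enumerate / join decomposition: each word between single space separators is fixed independently by its own character index.
import Mathlib
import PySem

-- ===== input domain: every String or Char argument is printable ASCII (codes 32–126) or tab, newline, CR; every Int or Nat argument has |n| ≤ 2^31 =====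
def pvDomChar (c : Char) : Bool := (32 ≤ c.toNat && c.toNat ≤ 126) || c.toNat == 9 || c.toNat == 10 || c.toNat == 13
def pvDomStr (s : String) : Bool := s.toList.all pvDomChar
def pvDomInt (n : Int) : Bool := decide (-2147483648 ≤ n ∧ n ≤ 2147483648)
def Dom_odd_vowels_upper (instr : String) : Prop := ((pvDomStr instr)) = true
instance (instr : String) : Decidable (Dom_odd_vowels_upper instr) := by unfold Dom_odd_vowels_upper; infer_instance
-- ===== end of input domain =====

-- B re-implements A's flat counter-resetting pass as a split-on-space / per-word enumerate / join decomposition (objective: simpler; no speed claim).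

-- ===== PORT A =====
-- flat fold over the characters; state = (output chars, counter i); a space resets i to -1 before the shared increment
def odd_vowels_upper (instr : String) : String :=
  let vowels : List Char := ['a', 'e', 'i', 'o', 'u']
  let r := instr.toList.foldl
    (fun (st : List Char × Int) c =>
      if vowels.contains c ∧ PySem.Int.mod st.2 2 = 1 then
        (st.1 ++ [PySem.Chars.upperChar c], st.2 + 1)
      else if c = ' ' then
        (st.1 ++ [c], (-1 : Int) + 1)
      else
        (st.1 ++ [c], st.2 + 1))
    ([], (0 : Int))
  String.mk r.1

-- ===== PORT B =====
-- `c in 'aeiou'` for a single character c is membership in the vowel characters (exact)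
def pvFixWord (w : List Char) : List Char :=
  (PySem.List.enumerate w 0).map
    (fun p => if PySem.Int.mod p.1 2 = 1 ∧ ("aeiou".toList.contains p.2) then PySem.Chars.upperChar p.2 else p.2)

def odd_vowels_upper_alt (instr : String) : String :=
  String.mk (PySem.Chars.join [' '] ((PySem.Chars.splitOn instr.toList [' ']).map pvFixWord))

-- ===== PRECONDITION & SPEC =====
def Spec_odd_vowels_upper (instr : String) (out : String) : Prop := out = odd_vowels_upper_alt instr
instance (instr : String) (out : String) : Decidable (Spec_odd_vowels_upper instr out) := by unfold Spec_odd_vowels_upper; infer_instance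

-- ===== CLAIM (what is proved, stated in full; the proofs are below) =====
def Claim_equal_odd_vowels_upper : Prop := ∀ (instr : String), Dom_odd_vowels_upper instr → Spec_odd_vowels_upper instr (odd_vowels_upper instr)

-- ===== LEMMAS AND PROOFS =====

-- common characterisation: process s starting with counter n (Python int semantics kept)
def pvStep (c : Char) (n : Int) : Char :=
  if ['a', 'e', 'i', 'o', 'u'].contains c ∧ PySem.Int.mod n 2 = 1 then PySem.Chars.upperChar c else c

def pvSpec : List Char → Int → List Char
  | [], _ => []
  | c :: rest, n => if c = ' ' then ' ' :: pvSpec rest 0 else pvStep c n :: pvSpec rest (n + 1)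

-- a direct structural model of split(' ')
def pvSplit : List Char → List Char → List (List Char)
  | pre, [] => [pre]
  | pre, c :: rest => if c = ' ' then pre :: pvSplit [] rest else pvSplit (pre ++ [c]) rest

lemma pvSplit_ne_nil (pre s : List Char) : pvSplit pre s ≠ [] := by
  induction s generalizing pre with
  | nil => simp [pvSplit]
  | cons c rest ih => by_cases h : c = ' ' <;> simp [pvSplit, h, ih]

lemma splitOn_go_eq (s : List Char) : ∀ (fuel : Nat) (cur : List Char) (acc : List (List Char)),
    s.length < fuel →
    PySem.Chars.splitOn.go [' '] fuel s cur acc = acc.reverse ++ pvSplit cur.reverse s := by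
  induction s with
  | nil =>
    intro fuel cur acc h
    match fuel with
    | f + 1 => simp [PySem.Chars.splitOn.go, pvSplit]
  | cons c rest ih =>
    intro fuel cur acc h
    match fuel with
    | f + 1 =>
      by_cases hc : c = ' '
      · have hp : [' '].isPrefixOf (c :: rest) = true := by simp [hc, List.isPrefixOf]
        rw [PySem.Chars.splitOn.go]
        simp only [hp, if_pos, List.length_cons, List.length_nil, List.drop_succ_cons,
          List.drop_zero]
        rw [ih f [] (cur.reverse :: acc) (by simpa using h)]
        simp [pvSplit, hc]
      · have hp : [' '].isPrefixOf (c :: rest) = false := by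
          simp only [List.isPrefixOf, List.isPrefixOf_nil_left, Bool.and_true,
            beq_eq_false_iff_ne, ne_eq]
          exact fun hh => hc (Eq.symm hh)
        rw [PySem.Chars.splitOn.go]
        simp only [hp]
        rw [if_neg Bool.false_ne_true]
        rw [ih f (c :: cur) acc (by simpa using Nat.lt_of_succ_lt_succ h)]
        simp [pvSplit, hc]

lemma splitOn_eq (s : List Char) : PySem.Chars.splitOn s [' '] = pvSplit [] s := by
  unfold PySem.Chars.splitOn
  simpa using splitOn_go_eq s (s.length + 1) [] [] (Nat.lt_succ_self _)

lemma fixWord_append (pre : List Char) (c : Char) :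
    pvFixWord (pre ++ [c]) = pvFixWord pre ++ [pvStep c pre.length] := by
  unfold pvFixWord
  rw [PySem.List.enumerate_append]
  simp only [List.map_append]
  congr 1
  simp [PySem.List.enumerate, pvStep, and_comm]

lemma join_cons (a b : List Char) (l : List (List Char)) :
    PySem.Chars.join [' '] (a :: b :: l) = a ++ ' ' :: PySem.Chars.join [' '] (b :: l) := by
  simp [PySem.Chars.join, List.intercalate]

lemma B_chars (s : List Char) : ∀ (pre : List Char),
    PySem.Chars.join [' '] ((pvSplit pre s).map pvFixWord)
      = pvFixWord pre ++ pvSpec s pre.length := by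
  induction s with
  | nil => intro pre; simp [pvSplit, pvSpec, PySem.Chars.join, List.intercalate]
  | cons c rest ih =>
    intro pre
    by_cases hc : c = ' '
    · subst hc
      rw [show pvSplit pre (' ' :: rest) = pre :: pvSplit [] rest from by simp [pvSplit]]
      rw [show pvSpec (' ' :: rest) (pre.length : Int) = ' ' :: pvSpec rest 0 from by
        simp [pvSpec]]
      rcases hr : pvSplit ([] : List Char) rest with _ | ⟨h, t⟩
      · exact absurd hr (pvSplit_ne_nil _ _)
      · have hih := ih ([] : List Char)
        rw [hr, List.map_cons] at hih
        calc PySem.Chars.join [' '] (List.map pvFixWord (pre :: h :: t))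
            = PySem.Chars.join [' '] (pvFixWord pre :: pvFixWord h :: List.map pvFixWord t) := by
              rw [List.map_cons, List.map_cons]
          _ = pvFixWord pre ++ ' ' :: PySem.Chars.join [' '] (pvFixWord h :: List.map pvFixWord t) :=
              join_cons _ _ _
          _ = pvFixWord pre ++ ' ' :: pvSpec rest 0 := by
              rw [hih]
              simp [pvFixWord, PySem.List.enumerate]
    · rw [show pvSplit pre (c :: rest) = pvSplit (pre ++ [c]) rest by simp [pvSplit, hc]]
      rw [ih (pre ++ [c])]
      rw [fixWord_append]
      simp only [pvSpec, if_neg hc, List.length_append, List.length_cons, List.length_nil]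
      push_cast
      simp [List.append_assoc]

lemma A_fold (s : List Char) : ∀ (out : List Char) (n : Int),
    (s.foldl
      (fun (st : List Char × Int) c =>
        if ['a', 'e', 'i', 'o', 'u'].contains c ∧ PySem.Int.mod st.2 2 = 1 then
          (st.1 ++ [PySem.Chars.upperChar c], st.2 + 1)
        else if c = ' ' then
          (st.1 ++ [c], (-1 : Int) + 1)
        else
          (st.1 ++ [c], st.2 + 1))
      (out, n)).1 = out ++ pvSpec s n := by
  induction s with
  | nil => intro out n; simp [pvSpec]
  | cons c rest ih =>
    intro out n
    by_cases h1 : ['a', 'e', 'i', 'o', 'u'].contains c ∧ PySem.Int.mod n 2 = 1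
    · have hc : c ≠ ' ' := by
        rcases h1 with ⟨hm, _⟩
        intro h; subst h; simp at hm
      simp only [List.foldl_cons, if_pos h1]
      rw [ih]
      simp only [pvSpec, pvStep, if_neg hc, if_pos h1]
      simp
    · by_cases hc : c = ' '
      · subst hc
        simp only [List.foldl_cons, if_neg h1]
        rw [ih]
        simp [pvSpec]
      · simp only [List.foldl_cons, if_neg h1, if_neg hc]
        rw [ih]
        simp only [pvSpec, pvStep, if_neg hc, if_neg h1]
        simp

-- ===== VERDICT (by name: the statement is the Claim_ definition above) =====
theorem odd_vowels_upper_spec : Claim_equal_odd_vowels_upper := by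
  intro instr _
  have hA : odd_vowels_upper instr = String.mk (pvSpec instr.toList 0) := by
    simp only [odd_vowels_upper]
    rw [A_fold]
    simp
  have hB : odd_vowels_upper_alt instr = String.mk (pvSpec instr.toList 0) := by
    simp only [odd_vowels_upper_alt]
    rw [splitOn_eq, B_chars]
    simp [pvFixWord, PySem.List.enumerate]
  unfold Spec_odd_vowels_upper
  rw [hA, hB]
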